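-- pv_equiv track=rewrite | github.com/fanbu1995/video_proc_code | post_process.py | trim_indices
-- ===== SOURCE A (Python) =====
-- def trim_indices(inds, trim_num = 3, trim_thres = 10):
-- 	l = len(inds)
-- 	to_trim = []
-- 	# trim the beginning
-- 	for i in range(min(l-1, trim_num)):
-- 		if inds[i+1] - inds[i] >= trim_thres:
-- 			to_trim.extend(range(i+1))
-- 			#to_trim.append(i)
-- 	# trim the end
-- 	for i in range(l-1, max(0,l-trim_num-1), -1):
-- 		if inds[i] - inds[i-1] >= trim_thres:
-- 			to_trim.extend(range(i,l))
-- 			#to_trim.append(i)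
--
-- 	return([inds[i] for i in range(l) if i not in to_trim])
-- ===== SOURCE B (Python) =====
-- def trim_indices(inds, trim_num=3, trim_thres=10):
--     l = len(inds)
--     # forward triggers: last one (ascending list => max) gives the prefix cutoff
--     fwd = [i + 1 for i in range(min(l - 1, trim_num)) if inds[i + 1] - inds[i] >= trim_thres]
--     start = fwd[-1] if fwd else 0
--     # backward triggers, enumerated ascending: first one (=> min) gives the suffix cutoff
--     bwd = [i for i in range(max(0, l - trim_num - 1) + 1, l) if inds[i] - inds[i - 1] >= trim_thres]
--     end = bwd[0] if bwd else l
--     return list(inds[start:end])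
-- ===== Notes on version B (the rewrite author's own statement) =====
-- stated objective: faster
-- what changed: B drops A's to_trim index list and its 'i not in to_trim' membership scan: it collects the (at most trim_num) triggering gap positions into two short comprehensions, takes the last forward trigger as the prefix cutoff and the first backward trigger as the suffix cutoff, and returns the single slice inds[start:end].
import Mathlib
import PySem

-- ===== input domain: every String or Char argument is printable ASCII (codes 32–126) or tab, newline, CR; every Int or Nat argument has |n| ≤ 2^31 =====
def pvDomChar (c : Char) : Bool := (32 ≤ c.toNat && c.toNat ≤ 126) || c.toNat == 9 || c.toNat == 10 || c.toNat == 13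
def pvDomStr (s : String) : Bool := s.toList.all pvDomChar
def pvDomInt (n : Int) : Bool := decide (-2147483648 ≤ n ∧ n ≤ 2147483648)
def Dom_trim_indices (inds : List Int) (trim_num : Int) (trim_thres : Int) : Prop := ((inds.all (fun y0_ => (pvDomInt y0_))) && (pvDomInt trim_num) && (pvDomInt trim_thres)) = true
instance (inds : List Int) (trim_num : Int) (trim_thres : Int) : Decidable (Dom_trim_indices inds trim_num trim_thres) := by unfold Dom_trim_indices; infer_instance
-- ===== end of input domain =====

-- B replaces A's quadratic to_trim membership list by two collected trigger-position lists,
-- a prefix cutoff (last forward trigger) and a suffix cutoff (first backward trigger), and one slice.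

-- ===== PORT A =====
-- literal transliteration of A: build to_trim by extending it with index ranges, then
-- keep the elements whose index is not in to_trim
def trim_indices (inds : List Int) (trim_num : Int) (trim_thres : Int) : List Int :=
  let l : Int := inds.length
  let to_trim : List Int :=
    (PySem.List.pyRange 0 (min (l - 1) trim_num) 1).foldl
      (fun acc i =>
        if PySem.List.pyGetD inds (i + 1) 0 - PySem.List.pyGetD inds i 0 ≥ trim_thres then
          acc ++ PySem.List.pyRange 0 (i + 1) 1
        else acc) []
  let to_trim : List Int :=
    (PySem.List.pyRange (l - 1) (max 0 (l - trim_num - 1)) (-1)).foldl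
      (fun acc i =>
        if PySem.List.pyGetD inds i 0 - PySem.List.pyGetD inds (i - 1) 0 ≥ trim_thres then
          acc ++ PySem.List.pyRange i l 1
        else acc) to_trim
  ((PySem.List.pyRange 0 l 1).filter (fun i => !(to_trim.contains i))).map
    (fun i => PySem.List.pyGetD inds i 0)

-- ===== PORT B =====
-- literal transliteration of B: list the triggering gap positions, pick fwd[-1] / bwd[0]
-- as cutoffs (defaults 0 / l), return the slice inds[start:end]
def trim_indices_alt (inds : List Int) (trim_num : Int) (trim_thres : Int) : List Int :=
  let l : Int := inds.length
  let fwd : List Int :=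
    ((PySem.List.pyRange 0 (min (l - 1) trim_num) 1).filter
        (fun i => decide (PySem.List.pyGetD inds (i + 1) 0 - PySem.List.pyGetD inds i 0 ≥ trim_thres))).map
      (fun i => i + 1)
  let start : Int := fwd.getLast?.getD 0
  let bwd : List Int :=
    (PySem.List.pyRange (max 0 (l - trim_num - 1) + 1) l 1).filter
      (fun i => decide (PySem.List.pyGetD inds i 0 - PySem.List.pyGetD inds (i - 1) 0 ≥ trim_thres))
  let stop : Int := bwd.head?.getD l
  PySem.List.slice inds (some start) (some stop)

-- ===== PRECONDITION & SPEC =====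
def Spec_trim_indices (inds : List Int) (trim_num : Int) (trim_thres : Int) (out : List Int) : Prop := out = trim_indices_alt inds trim_num trim_thres
instance (inds : List Int) (trim_num : Int) (trim_thres : Int) (out : List Int) : Decidable (Spec_trim_indices inds trim_num trim_thres out) := by unfold Spec_trim_indices; infer_instance

-- ===== CLAIM (what is proved, stated in full; the proofs are below) =====
def Claim_equal_trim_indices : Prop := ∀ (inds : List Int) (trim_num : Int) (trim_thres : Int), Dom_trim_indices inds trim_num trim_thres → Spec_trim_indices inds trim_num trim_thres (trim_indices inds trim_num trim_thres)

-- ===== LEMMAS AND PROOFS =====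

-- "keep the last triggering value" as a fold equals last-of-filtered-list
lemma foldl_ite_eq_getLast (p : Int → Prop) [DecidablePred p] (f : Int → Int) :
    ∀ (xs : List Int) (s0 : Int),
      xs.foldl (fun s i => if p i then f i else s) s0
        = ((xs.filter (fun i => decide (p i))).map f).getLast?.getD s0 := by
  intro xs
  induction xs with
  | nil => intro s0; simp
  | cons x xs ih =>
    intro s0
    simp only [List.foldl_cons, List.filter_cons]
    by_cases hp : p x
    · rw [if_pos hp, if_pos (by simpa using hp)]
      rw [ih (f x)]
      cases h : (xs.filter (fun i => decide (p i))).map f with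
      | nil => simp [h]
      | cons y ys =>
        cases hz : (y :: ys).getLast? with
        | none => simp at hz
        | some z => simp [h, hz]
    · rw [if_neg hp, if_neg (by simpa using hp)]
      exact ih s0

-- "keep the last triggering value" as a right fold equals head-of-filtered-list
lemma foldr_ite_eq_head (p : Int → Prop) [DecidablePred p] :
    ∀ (xs : List Int) (e0 : Int),
      xs.foldr (fun i e => if p i then i else e) e0
        = (xs.filter (fun i => decide (p i))).head?.getD e0 := by
  intro xs
  induction xs with
  | nil => intro e0; simp
  | cons x xs ih =>
    intro e0
    simp only [List.foldr_cons, List.filter_cons]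
    by_cases hp : p x
    · rw [if_pos hp, if_pos (by simpa using hp)]
      simp
    · rw [if_neg hp, if_neg (by simpa using hp)]
      exact ih e0

-- First loop of A: membership in the accumulated to_trim list is "index below the fold's
-- cutoff", and the cutoff stays within [0, l].
lemma loop1_char (inds : List Int) (tt l : Int) :
    ∀ (n : Nat) (a b : Int) (acc : List Int) (s : Int),
      (b - a).toNat = n → 0 ≤ s → s ≤ a → s ≤ l → b ≤ l →
      (∀ j, j ∈ acc ↔ 0 ≤ j ∧ j < s) →
      ((∀ j, j ∈ (PySem.List.pyRange a b 1).foldl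
          (fun acc i =>
            if PySem.List.pyGetD inds (i + 1) 0 - PySem.List.pyGetD inds i 0 ≥ tt then
              acc ++ PySem.List.pyRange 0 (i + 1) 1
            else acc) acc ↔
        0 ≤ j ∧ j < (PySem.List.pyRange a b 1).foldl
          (fun s i =>
            if PySem.List.pyGetD inds (i + 1) 0 - PySem.List.pyGetD inds i 0 ≥ tt then
              i + 1
            else s) s)
      ∧ 0 ≤ (PySem.List.pyRange a b 1).foldl
          (fun s i =>
            if PySem.List.pyGetD inds (i + 1) 0 - PySem.List.pyGetD inds i 0 ≥ tt then
              i + 1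
            else s) s
      ∧ (PySem.List.pyRange a b 1).foldl
          (fun s i =>
            if PySem.List.pyGetD inds (i + 1) 0 - PySem.List.pyGetD inds i 0 ≥ tt then
              i + 1
            else s) s ≤ l) := by
  intro n
  induction n with
  | zero =>
    intro a b acc s h0 hs0 hsa hsl hbl hmem
    rw [PySem.List.pyRange_one_eq_nil (by omega)]
    exact ⟨hmem, hs0, hsl⟩
  | succ n ih =>
    intro a b acc s h0 hs0 hsa hsl hbl hmem
    rw [PySem.List.pyRange_one_cons (by omega : a < b)]
    simp only [List.foldl_cons]
    by_cases hp : PySem.List.pyGetD inds (a + 1) 0 - PySem.List.pyGetD inds a 0 ≥ tt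
    · rw [if_pos hp, if_pos hp]
      refine ih (a + 1) b (acc ++ PySem.List.pyRange 0 (a + 1) 1) (a + 1)
        (by omega) (by omega) (by omega) (by omega) hbl ?_
      intro j
      simp only [List.mem_append, hmem j, PySem.List.mem_pyRange_one]
      omega
    · rw [if_neg hp, if_neg hp]
      exact ih (a + 1) b acc s (by omega) hs0 (by omega) hsl hbl hmem

-- Second loop of A: membership in to_trim becomes "old membership, or index at/above the
-- fold's end cutoff (and below l)", and the cutoff stays within [0, l].
lemma loop2_char (inds : List Int) (tt l : Int) (Q : Int → Prop) :
    ∀ (n : Nat) (a b : Int) (acc : List Int) (e : Int),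
      (a - b).toNat = n → 0 ≤ b → a + 1 ≤ e → e ≤ l → 0 ≤ e →
      (∀ j, j ∈ acc ↔ Q j ∨ (e ≤ j ∧ j < l)) →
      ((∀ j, j ∈ (PySem.List.pyRange a b (-1)).foldl
          (fun acc i =>
            if PySem.List.pyGetD inds i 0 - PySem.List.pyGetD inds (i - 1) 0 ≥ tt then
              acc ++ PySem.List.pyRange i l 1
            else acc) acc ↔
        Q j ∨ ((PySem.List.pyRange a b (-1)).foldl
          (fun e i =>
            if PySem.List.pyGetD inds i 0 - PySem.List.pyGetD inds (i - 1) 0 ≥ tt then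
              i
            else e) e ≤ j ∧ j < l))
      ∧ 0 ≤ (PySem.List.pyRange a b (-1)).foldl
          (fun e i =>
            if PySem.List.pyGetD inds i 0 - PySem.List.pyGetD inds (i - 1) 0 ≥ tt then
              i
            else e) e
      ∧ (PySem.List.pyRange a b (-1)).foldl
          (fun e i =>
            if PySem.List.pyGetD inds i 0 - PySem.List.pyGetD inds (i - 1) 0 ≥ tt then
              i
            else e) e ≤ l) := by
  intro n
  induction n with
  | zero =>
    intro a b acc e h0 hb0 hae hel he0 hmem
    rw [PySem.List.pyRange_neg_one_eq_nil (by omega)]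
    exact ⟨hmem, he0, hel⟩
  | succ n ih =>
    intro a b acc e h0 hb0 hae hel he0 hmem
    rw [PySem.List.pyRange_neg_one_cons (by omega : b < a)]
    simp only [List.foldl_cons]
    by_cases hp : PySem.List.pyGetD inds a 0 - PySem.List.pyGetD inds (a - 1) 0 ≥ tt
    · rw [if_pos hp, if_pos hp]
      refine ih (a - 1) b (acc ++ PySem.List.pyRange a l 1) a
        (by omega) hb0 (by omega) (by omega) (by omega) ?_
      intro j
      simp only [List.mem_append, hmem j, PySem.List.mem_pyRange_one]
      constructor
      · rintro ((h | h) | h)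
        · exact Or.inl h
        · exact Or.inr (by omega)
        · exact Or.inr (by omega)
      · rintro (h | h)
        · exact Or.inl (Or.inl h)
        · exact Or.inr h
    · rw [if_neg hp, if_neg hp]
      exact ih (a - 1) b acc e (by omega) hb0 (by omega) hel he0 hmem

-- The kept middle block of indices, mapped through inds, is exactly the slice inds[S:E].
lemma filter_map_eq_slice (inds : List Int) (S E : Int)
    (hS0 : 0 ≤ S) (hSl : S ≤ (inds.length : Int)) (hE0 : 0 ≤ E) (hEl : E ≤ (inds.length : Int)) :
    ((PySem.List.pyRange 0 (inds.length : Int) 1).filter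
        (fun j => decide (S ≤ j ∧ j < E))).map (fun j => PySem.List.pyGetD inds j 0) =
      PySem.List.slice inds (some S) (some E) := by
  rw [PySem.List.slice_toNat inds hS0 hE0]
  by_cases hSE : S ≤ E
  · rw [PySem.List.pyRange_one_append 0 S (inds.length : Int) hS0 hSl,
        PySem.List.pyRange_one_append S E (inds.length : Int) hSE hEl,
        List.filter_append, List.filter_append]
    rw [List.filter_eq_nil_iff.mpr (by
      intro x hx
      rw [PySem.List.mem_pyRange_one] at hx
      simp only [decide_eq_true_eq]
      omega)]
    rw [List.filter_eq_self.mpr (by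
      intro x hx
      rw [PySem.List.mem_pyRange_one] at hx
      simp only [decide_eq_true_eq]
      omega)]
    rw [List.filter_eq_nil_iff.mpr (by
      intro x hx
      rw [PySem.List.mem_pyRange_one] at hx
      simp only [decide_eq_true_eq]
      omega)]
    simp only [List.nil_append, List.append_nil]
    have hdrop : (PySem.List.pyRange S (inds.length : Int) 1).map (fun j => PySem.List.pyGetD inds j 0)
        = inds.drop S.toNat := PySem.List.map_pyGetD_pyRange' inds 0 hS0
    rw [PySem.List.pyRange_one_append S E (inds.length : Int) hSE hEl, List.map_append] at hdrop
    rw [← hdrop]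
    have hlen : ((PySem.List.pyRange S E 1).map (fun j => PySem.List.pyGetD inds j 0)).length
        = E.toNat - S.toNat := by
      rw [List.length_map, PySem.List.length_pyRange_one]
      omega
    rw [← hlen, List.take_left]
  · rw [List.filter_eq_nil_iff.mpr (by
      intro x hx
      simp only [decide_eq_true_eq]
      omega)]
    have : E.toNat - S.toNat = 0 := by omega
    rw [this]
    simp

-- ===== VERDICT (by name: the statement is the Claim_ definition above) =====
theorem trim_indices_spec : Claim_equal_trim_indices := by
  intro inds trim_num trim_thres _
  unfold Spec_trim_indices trim_indices trim_indices_alt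
  simp only []
  -- rewrite B's two cutoffs as the corresponding folds over A's loop ranges
  have hstart :
      (((PySem.List.pyRange 0 (min ((inds.length : Int) - 1) trim_num) 1).filter
            (fun i => decide (PySem.List.pyGetD inds (i + 1) 0 - PySem.List.pyGetD inds i 0 ≥ trim_thres))).map
          (fun i => i + 1)).getLast?.getD 0
        = (PySem.List.pyRange 0 (min ((inds.length : Int) - 1) trim_num) 1).foldl
            (fun s i =>
              if PySem.List.pyGetD inds (i + 1) 0 - PySem.List.pyGetD inds i 0 ≥ trim_thres then i + 1
              else s) 0 := by
    exact (foldl_ite_eq_getLast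
      (fun i => PySem.List.pyGetD inds (i + 1) 0 - PySem.List.pyGetD inds i 0 ≥ trim_thres)
      (fun i => i + 1) _ 0).symm
  have erev : PySem.List.pyRange ((inds.length : Int) - 1) (max 0 ((inds.length : Int) - trim_num - 1)) (-1)
      = (PySem.List.pyRange (max 0 ((inds.length : Int) - trim_num - 1) + 1) ((inds.length : Int)) 1).reverse := by
    rw [PySem.List.pyRange_neg_one_eq_reverse]
    have h1 : (inds.length : Int) - 1 + 1 = (inds.length : Int) := by omega
    rw [h1]
  have hstop :
      ((PySem.List.pyRange (max 0 ((inds.length : Int) - trim_num - 1) + 1) ((inds.length : Int)) 1).filter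
          (fun i => decide (PySem.List.pyGetD inds i 0 - PySem.List.pyGetD inds (i - 1) 0 ≥ trim_thres))).head?.getD (inds.length : Int)
        = (PySem.List.pyRange ((inds.length : Int) - 1) (max 0 ((inds.length : Int) - trim_num - 1)) (-1)).foldl
            (fun e i =>
              if PySem.List.pyGetD inds i 0 - PySem.List.pyGetD inds (i - 1) 0 ≥ trim_thres then i
              else e) (inds.length : Int) := by
    rw [erev, List.foldl_reverse]
    exact (foldr_ite_eq_head
      (fun i => PySem.List.pyGetD inds i 0 - PySem.List.pyGetD inds (i - 1) 0 ≥ trim_thres)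
      _ (inds.length : Int)).symm
  rw [hstart, hstop]
  obtain ⟨h1mem, hS0, hSl⟩ :=
    loop1_char inds trim_thres (inds.length : Int)
      ((min ((inds.length : Int) - 1) trim_num - 0).toNat) 0
      (min ((inds.length : Int) - 1) trim_num) [] 0
      rfl le_rfl le_rfl (by positivity) (by omega)
      (by intro j; simp)
  obtain ⟨h2mem, hE0, hEl⟩ :=
    loop2_char inds trim_thres (inds.length : Int)
      (fun j => 0 ≤ j ∧ j < (PySem.List.pyRange 0 (min ((inds.length : Int) - 1) trim_num) 1).foldl
          (fun s i =>
            if PySem.List.pyGetD inds (i + 1) 0 - PySem.List.pyGetD inds i 0 ≥ trim_thres then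
              i + 1
            else s) 0)
      (((inds.length : Int) - 1 - max 0 ((inds.length : Int) - trim_num - 1)).toNat)
      ((inds.length : Int) - 1) (max 0 ((inds.length : Int) - trim_num - 1)) _ (inds.length : Int)
      rfl (le_max_left 0 _) (by omega) le_rfl (by positivity)
      (by
        intro j
        rw [h1mem j]
        constructor
        · exact fun h => Or.inl h
        · rintro (h | h)
          · exact h
          · omega)
  rw [List.filter_congr (q := fun j => decide
      ((PySem.List.pyRange 0 (min ((inds.length : Int) - 1) trim_num) 1).foldl
          (fun s i =>
            if PySem.List.pyGetD inds (i + 1) 0 - PySem.List.pyGetD inds i 0 ≥ trim_thres then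
              i + 1
            else s) 0 ≤ j ∧ j < (PySem.List.pyRange ((inds.length : Int) - 1) (max 0 ((inds.length : Int) - trim_num - 1)) (-1)).foldl
          (fun e i =>
            if PySem.List.pyGetD inds i 0 - PySem.List.pyGetD inds (i - 1) 0 ≥ trim_thres then
              i
            else e) (inds.length : Int)))
    (by
      intro x hx
      rw [PySem.List.mem_pyRange_one] at hx
      rw [List.contains_eq_mem, ← decide_not, decide_eq_decide]
      rw [h2mem x]
      omega)]
  exact filter_map_eq_slice inds _ _ hS0 hSl hE0 hEl
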